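-- pv_equiv track=rewrite | github.com/miroegres/AoC2025 | d04/p2.py | overlay_X_after_removal
-- ===== SOURCE A (Python) =====
-- def overlay_X_after_removal(updated_grid, removed_coords):
--     """Return lines marking just-removed positions with 'X'."""
--     removed_set = set(removed_coords)
--     out = []
--     for r, row in enumerate(updated_grid):
--         line = []
--         for c, ch in enumerate(row):
--             if (r, c) in removed_set:
--                 line.append('X')  # show removal
--             else:
--                 line.append(ch)
--         out.append(''.join(line))
--     return out
-- ===== SOURCE B (Python) =====
-- def overlay_X_after_removal(updated_grid, removed_coords):
--     """Return lines marking just-removed positions with 'X'."""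
--     by_row = {}
--     for r, c in removed_coords:
--         by_row.setdefault(r, []).append(c)
--     out = []
--     for r, row in enumerate(updated_grid):
--         cols = by_row.get(r)
--         if cols is None:
--             out.append(row)
--         else:
--             chars = list(row)
--             for c in cols:
--                 if 0 <= c < len(chars):
--                     chars[c] = 'X'
--             out.append(''.join(chars))
--     return out
-- ===== Notes on version B (the rewrite author's own statement) =====
-- stated objective: faster
-- what changed: B replaces A's per-cell membership test against a set with a row-to-columns dict built once from removed_coords, passing untouched rows through unchanged and overwriting only the listed in-range cells of affected rows.
import Mathlib
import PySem

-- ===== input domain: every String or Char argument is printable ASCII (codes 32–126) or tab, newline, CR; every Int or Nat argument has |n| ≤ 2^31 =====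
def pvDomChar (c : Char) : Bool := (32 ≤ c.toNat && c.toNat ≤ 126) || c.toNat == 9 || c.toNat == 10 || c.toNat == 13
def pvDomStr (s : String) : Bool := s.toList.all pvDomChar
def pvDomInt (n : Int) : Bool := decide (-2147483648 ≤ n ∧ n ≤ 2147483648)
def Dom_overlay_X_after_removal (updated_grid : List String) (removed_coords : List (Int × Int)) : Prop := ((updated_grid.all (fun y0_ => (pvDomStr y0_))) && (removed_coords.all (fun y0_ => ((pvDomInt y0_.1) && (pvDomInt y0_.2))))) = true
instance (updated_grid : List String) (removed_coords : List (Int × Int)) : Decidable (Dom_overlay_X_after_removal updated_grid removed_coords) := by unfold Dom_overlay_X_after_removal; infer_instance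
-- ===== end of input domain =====

-- B builds a row→columns index once and rewrites only the listed cells of the affected
-- rows (untouched rows are passed through), instead of testing every cell for set
-- membership; result values are identical; a timing run measured B faster by a constant factor.

-- ===== PORT A =====
-- A: set of removed coordinates, mark every (r,c) cell found in it.
def overlay_X_after_removal (updated_grid : List String) (removed_coords : List (Int × Int)) : List String :=
  let removedSet : PySem.Set (Int × Int) := PySem.Set.ofList removed_coords
  (PySem.List.enumerate updated_grid).map (fun rrow =>
    String.ofList ((PySem.List.enumerate rrow.2.toList).map (fun cch =>
      if (rrow.1, cch.1) ∈ removedSet then 'X' else cch.2)))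

-- ===== PORT B =====
-- B: group removed columns by row (insertion-ordered dict, setdefault/append),
-- then rewrite only listed in-range cells of the affected rows.
def overlay_X_after_removal_alt (updated_grid : List String) (removed_coords : List (Int × Int)) : List String :=
  let byRow : PySem.Dict Int (List Int) :=
    removed_coords.foldl (fun d p => d.modify p.1 [] (fun cs => cs ++ [p.2])) PySem.Dict.empty
  (PySem.List.enumerate updated_grid).map (fun rrow =>
    match byRow.get? rrow.1 with
    | none => rrow.2
    | some cols => String.ofList (cols.foldl (fun chs c =>
        if 0 ≤ c ∧ c < (chs.length : Int) then chs.set c.toNat 'X' else chs) rrow.2.toList))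

-- ===== PRECONDITION & SPEC =====
def Spec_overlay_X_after_removal (updated_grid : List String) (removed_coords : List (Int × Int)) (out : List String) : Prop := out = overlay_X_after_removal_alt updated_grid removed_coords
instance (updated_grid : List String) (removed_coords : List (Int × Int)) (out : List String) : Decidable (Spec_overlay_X_after_removal updated_grid removed_coords out) := by unfold Spec_overlay_X_after_removal; infer_instance

-- ===== CLAIM (what is proved, stated in full; the proofs are below) =====
def Claim_equal_overlay_X_after_removal : Prop := ∀ (updated_grid : List String) (removed_coords : List (Int × Int)), Dom_overlay_X_after_removal updated_grid removed_coords → Spec_overlay_X_after_removal updated_grid removed_coords (overlay_X_after_removal updated_grid removed_coords)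

-- ===== LEMMAS AND PROOFS =====

-- B's in-place marking loop, characterised cell by cell.
theorem pv_foldl_set_eq_map (cols : List Int) (l : List Char) :
    cols.foldl (fun chs c =>
        if 0 ≤ c ∧ c < (chs.length : Int) then chs.set c.toNat 'X' else chs) l
      = (PySem.List.enumerate l).map (fun p => if p.1 ∈ cols then 'X' else p.2) := by
  induction cols generalizing l with
  | nil => simp [PySem.List.map_snd_enumerate]
  | cons c cols ih =>
      simp only [List.foldl_cons]
      rw [ih]
      apply List.ext_getElem
      · by_cases h : 0 ≤ c ∧ c < (l.length : Int) <;> simp [h, PySem.List.length_enumerate]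
      · intro k h1 h2
        have hk : k < l.length := by
          by_cases h : 0 ≤ c ∧ c < (l.length : Int) <;>
            simpa [h, PySem.List.length_enumerate] using h1
        by_cases h : 0 ≤ c ∧ c < (l.length : Int)
        · have hlen : (l.set c.toNat 'X').length = l.length := by simp
          simp only [h, and_self, if_true, List.getElem_map,
            PySem.List.getElem_enumerate, zero_add]
          rw [List.getElem_set]
          by_cases hc : (k : Int) = c
          · have : c.toNat = k := by omega
            simp [hc, this]
          · have : ¬ c.toNat = k := by omega
            simp [this, hc]
        · simp only [h, if_false, List.getElem_map,
            PySem.List.getElem_enumerate, zero_add]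
          have hc : ¬ (k : Int) = c := by omega
          simp [hc]

-- the grouped-by-row column list, as a membership fact
theorem pv_mem_byRow (removed_coords : List (Int × Int)) (r c : Int) :
    (c ∈ ((removed_coords.foldl (fun d p => d.modify p.1 [] (fun cs => cs ++ [p.2]))
        PySem.Dict.empty).getD r [])) ↔ (r, c) ∈ removed_coords := by
  rw [PySem.Dict.getD_foldl_modify_append]
  simp only [PySem.Dict.getD_empty, List.nil_append, List.mem_map, List.mem_filter,
    beq_iff_eq]
  constructor
  · rintro ⟨⟨a, b⟩, ⟨hm, hr⟩, hc⟩
    simp at hr hc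
    subst hr; subst hc; exact hm
  · intro hm; exact ⟨(r, c), ⟨hm, rfl⟩, rfl⟩

theorem pv_row_eq (removed_coords : List (Int × Int)) (r : Int) (row : String) :
    String.ofList ((PySem.List.enumerate row.toList).map (fun cch =>
        if (r, cch.1) ∈ PySem.Set.ofList removed_coords then 'X' else cch.2))
      = (match (removed_coords.foldl (fun d p => d.modify p.1 [] (fun cs => cs ++ [p.2]))
            PySem.Dict.empty).get? r with
         | none => row
         | some cols => String.ofList (cols.foldl (fun chs c =>
             if 0 ≤ c ∧ c < (chs.length : Int) then chs.set c.toNat 'X' else chs) row.toList)) := by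
  set d := removed_coords.foldl (fun d p => d.modify p.1 [] (fun cs => cs ++ [p.2]))
      PySem.Dict.empty with hd
  have key : ∀ c : Int, (c ∈ d.getD r []) ↔ (r, c) ∈ removed_coords := by
    intro c; rw [hd]; exact pv_mem_byRow removed_coords r c
  cases hg : d.get? r with
  | none =>
      have hempty : d.getD r [] = [] := PySem.Dict.getD_of_get?_eq_none d [] hg
      have : ∀ c : Int, (r, c) ∉ removed_coords := by
        intro c hc
        have := (key c).mpr hc
        simp [hempty] at this
      have hmap : ∀ p ∈ PySem.List.enumerate row.toList 0,
          (if (r, p.1) ∈ PySem.Set.ofList removed_coords then 'X' else p.2) = p.2 := by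
        intro p _
        have : (r, p.1) ∉ PySem.Set.ofList removed_coords := by
          rw [PySem.Set.mem_ofList]; exact this p.1
        simp [this]
      rw [List.map_congr_left hmap, PySem.List.map_snd_enumerate]
      simp
  | some cols =>
      dsimp only
      have hcols : d.getD r [] = cols := PySem.Dict.getD_of_get?_eq_some d [] hg
      rw [pv_foldl_set_eq_map]
      congr 1
      apply List.map_congr_left
      intro p _
      have : (r, p.1) ∈ PySem.Set.ofList removed_coords ↔ p.1 ∈ cols := by
        rw [PySem.Set.mem_ofList, ← key p.1, hcols]
      simp only [this]

-- ===== VERDICT (by name: the statement is the Claim_ definition above) =====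
theorem overlay_X_after_removal_spec : Claim_equal_overlay_X_after_removal := by
  intro updated_grid removed_coords _
  unfold Spec_overlay_X_after_removal overlay_X_after_removal overlay_X_after_removal_alt
  apply List.map_congr_left
  intro rrow _
  exact pv_row_eq removed_coords rrow.1 rrow.2
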